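-- pv_equiv track=rewrite | github.com/kinson/algorithm_engineering_wsn_project | smallest_last_vertex.py | generate_buckets_of_vertices
-- ===== SOURCE A (Python) =====
-- def generate_buckets_of_vertices(adj_list):
--     """Return a dictionary with buckets of vertices placed based on their degree."""
--     buckets = {}
--     max_degree = 0
--     for vertex, dict in adj_list.items():
--         vertex_degree = len(dict['connected_points'])
--         if vertex_degree > max_degree:
--             max_degree = vertex_degree
--         if vertex_degree in buckets:
--             buckets[vertex_degree].append(vertex)
--         else:
--             buckets[vertex_degree] = [vertex]
--     return (buckets, max_degree)
-- ===== SOURCE B (Python) =====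
-- def generate_buckets_of_vertices(adj_list):
--     """Return a dictionary with buckets of vertices placed based on their degree."""
--     degs = [(v, len(d['connected_points'])) for v, d in adj_list.items()]
--     seen = list(dict.fromkeys(deg for _, deg in degs))
--     buckets = {deg: [v for v, dv in degs if dv == deg] for deg in seen}
--     max_degree = max((deg for _, deg in degs), default=0)
--     return (buckets, max_degree)
-- ===== Notes on version B (the rewrite author's own statement) =====
-- stated objective: alternative
-- what changed: Replaces the single-pass accumulating loop (mutable buckets dict plus running max) with a declarative two-phase construction: compute the degree sequence once, dedup degrees in first-occurrence order, build each bucket by filtering the degree sequence, and take max with default=0.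
import Mathlib
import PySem

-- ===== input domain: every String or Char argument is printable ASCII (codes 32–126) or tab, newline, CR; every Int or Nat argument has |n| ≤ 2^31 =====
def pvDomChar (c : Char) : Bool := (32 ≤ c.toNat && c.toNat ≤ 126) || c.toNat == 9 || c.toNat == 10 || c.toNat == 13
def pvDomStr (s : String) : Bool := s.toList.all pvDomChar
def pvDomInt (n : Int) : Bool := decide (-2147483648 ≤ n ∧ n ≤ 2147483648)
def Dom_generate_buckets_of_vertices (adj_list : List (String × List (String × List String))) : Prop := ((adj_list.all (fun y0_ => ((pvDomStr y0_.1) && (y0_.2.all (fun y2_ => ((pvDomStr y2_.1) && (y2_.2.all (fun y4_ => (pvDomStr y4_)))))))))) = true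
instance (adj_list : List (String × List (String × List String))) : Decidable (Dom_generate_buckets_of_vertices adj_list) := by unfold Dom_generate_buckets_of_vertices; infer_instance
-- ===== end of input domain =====

-- B builds the buckets declaratively (degree sequence, ordered dedup of degrees, one filter per degree,
-- max with default 0) instead of A's single accumulating loop; same results, no speed claim.

-- degree of a vertex entry: len(d['connected_points']) (KeyError when the key is absent: Pre_ excludes that)
def pvDeg (p : String × List (String × List String)) : Int :=
  (((PySem.Dict.mk p.2).getD "connected_points" []).length : Int)

-- ===== PORT A =====
def generate_buckets_of_vertices (adj_list : List (String × List (String × List String))) : (List (Int × List String)) × Int :=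
  let r := adj_list.foldl (fun st p =>
      let vd : Int := pvDeg p
      let m := if vd > st.2 then vd else st.2
      let b := if st.1.contains vd then st.1.modify vd [] (fun l => l ++ [p.1])
               else st.1.insert vd [p.1]
      (b, m)) ((PySem.Dict.mk []), 0)
  (r.1.items, r.2)

-- ===== PORT B =====
def generate_buckets_of_vertices_alt (adj_list : List (String × List (String × List String))) : (List (Int × List String)) × Int :=
  let degs : List (String × Int) := adj_list.map (fun p => (p.1, pvDeg p))
  let seen : List Int := PySem.List.dedup (degs.map (fun q => q.2))
  let buckets : PySem.Dict Int (List String) :=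
    seen.foldl (fun d k => d.insert k ((degs.filter (fun q => q.2 == k)).map (fun q => q.1))) (PySem.Dict.mk [])
  (buckets.items, PySem.List.maxD (degs.map (fun q => q.2)) (fun y => y) 0)

-- ===== PRECONDITION & SPEC =====
-- Pre_ excludes exactly the inputs where A (and B alike) raise KeyError: an entry whose dict lacks 'connected_points'.
def Pre_generate_buckets_of_vertices (adj_list : List (String × List (String × List String))) : Prop :=
  ∀ p ∈ adj_list, (PySem.Dict.mk p.2).contains "connected_points" = true
instance (adj_list : List (String × List (String × List String))) : Decidable (Pre_generate_buckets_of_vertices adj_list) := by unfold Pre_generate_buckets_of_vertices; infer_instance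
def pvWitness_generate_buckets_of_vertices : (List (String × List (String × List String))) :=
  [("a", [("connected_points", ["b", "c"])]), ("b", [("connected_points", ["a"])])]

def Spec_generate_buckets_of_vertices (adj_list : List (String × List (String × List String))) (out : (List (Int × List String)) × Int) : Prop := out = generate_buckets_of_vertices_alt adj_list
instance (adj_list : List (String × List (String × List String))) (out : (List (Int × List String)) × Int) : Decidable (Spec_generate_buckets_of_vertices adj_list out) := by unfold Spec_generate_buckets_of_vertices; infer_instance

-- ===== CLAIM (what is proved, stated in full; the proofs are below) =====
def Claim_equal_generate_buckets_of_vertices : Prop := ∀ (adj_list : List (String × List (String × List String))), Dom_generate_buckets_of_vertices adj_list → Pre_generate_buckets_of_vertices adj_list → Spec_generate_buckets_of_vertices adj_list (generate_buckets_of_vertices adj_list)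

-- ===== LEMMAS AND PROOFS =====

-- A's membership-tested append/insert step is exactly Dict.modify with default []
lemma pv_step_buckets (d : PySem.Dict Int (List String)) (k : Int) (v : String) :
    (if d.contains k then d.modify k [] (fun l => l ++ [v]) else d.insert k [v])
      = d.modify k [] (fun l => l ++ [v]) := by
  by_cases h : d.contains k = true
  · simp [h]
  · simp only [Bool.not_eq_true] at h
    simp [h, PySem.Dict.modify, PySem.Dict.getD_of_not_contains d [] h]

-- A's running-max loop over a nonnegative list is max(xs, default=0)
lemma pv_foldmax_eq (xs : List Int) (h : ∀ x ∈ xs, 0 ≤ x) :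
    xs.foldl (fun m d => if d > m then d else m) 0 = PySem.List.maxD xs (fun y => y) 0 := by
  cases xs with
  | nil => simp [PySem.List.maxD, PySem.List.max?]
  | cons x t =>
    have hx : 0 ≤ x := h x (by simp)
    rw [PySem.List.maxD, PySem.List.max?_id_cons, Option.getD_some, List.foldl_cons]
    have h1 : (if x > 0 then x else 0) = x := by split_ifs <;> omega
    rw [h1]
    have h2 : (fun (m d : Int) => if d > m then d else m) = fun m d => max m d := by
      funext m d
      simp only [max_def]
      split_ifs <;> omega
    rw [h2]

theorem generate_buckets_of_vertices_eq (adj_list : List (String × List (String × List String))) :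
    generate_buckets_of_vertices adj_list = generate_buckets_of_vertices_alt adj_list := by
  unfold generate_buckets_of_vertices generate_buckets_of_vertices_alt
  simp only []
  have hstep : (fun (st : PySem.Dict Int (List String) × Int) (p : String × List (String × List String)) =>
      let vd : Int := pvDeg p
      let m := if vd > st.2 then vd else st.2
      let b := if st.1.contains vd then st.1.modify vd [] (fun l => l ++ [p.1])
               else st.1.insert vd [p.1]
      (b, m))
    = fun st p => (st.1.modify (pvDeg p) [] (fun l => l ++ [p.1]),
                   if pvDeg p > st.2 then pvDeg p else st.2) := by
    funext st p
    simp only [pv_step_buckets]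
  have hsplit := PySem.List.foldl_prod_mk
      (fun (d : PySem.Dict Int (List String)) (p : String × List (String × List String)) =>
        d.modify (pvDeg p) [] fun l => l ++ [p.1])
      (fun (m : Int) (p : String × List (String × List String)) =>
        if pvDeg p > m then pvDeg p else m) adj_list (PySem.Dict.mk []) 0
  rw [hstep]
  simp only [hsplit]
  have hD : (adj_list.map (fun p => (p.1, pvDeg p))).map (fun q => q.2) = adj_list.map pvDeg := by
    simp [List.map_map, Function.comp_def]
  refine Prod.ext ?_ ?_
  · show (List.foldl (fun d p => d.modify (pvDeg p) [] fun l => l ++ [p.1]) (PySem.Dict.mk []) adj_list).items = _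
    have hF : List.foldl (fun d p => d.modify (pvDeg p) [] fun l => l ++ [p.1]) (PySem.Dict.mk []) adj_list
        = List.foldl (fun d (q : Int × String) => d.modify q.1 [] fun l => l ++ [q.2]) (PySem.Dict.mk [])
            (adj_list.map (fun p => (pvDeg p, p.1))) := by
      simp [List.foldl_map]
    rw [hF]
    have hnd := PySem.Dict.nodup_keys_foldl_modify_key (adj_list.map (fun p => (pvDeg p, p.1)))
        (fun q => q.1) ([] : List String) (fun d q => fun v => v ++ [q.2]) (PySem.Dict.mk [])
        (by simp [PySem.Dict.keys])
    rw [PySem.Dict.items_eq_map_keys _ hnd []]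
    have hkeys := PySem.Dict.keys_foldl_modify_key (adj_list.map (fun p => (pvDeg p, p.1)))
        (fun q => q.1) ([] : List String) (fun d q => fun v => v ++ [q.2]) (PySem.Dict.mk [])
    rw [hkeys]
    have hB := PySem.Dict.items_foldl_insert_fresh
        (PySem.List.dedup ((adj_list.map (fun p => (p.1, pvDeg p))).map (fun q => q.2)))
        (fun a : Int => a)
        (fun k => ((adj_list.map (fun p => (p.1, pvDeg p))).filter (fun q => q.2 == k)).map (fun q => q.1))
        (PySem.Dict.mk [])
        (by intro a _; simp [PySem.Dict.contains])
        (by simp)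
    simp only at hB
    rw [hB]
    have hkeyseq : PySem.Set.update (({items:=[]} : PySem.Dict Int (List String)).keys)
        (List.map (fun q => q.1) (List.map (fun p => (pvDeg p, p.1)) adj_list))
        = PySem.List.dedup (List.map (fun q => q.2) (List.map (fun p => (p.1, pvDeg p)) adj_list)) := by
      simp [PySem.Set.update, PySem.Set.ofList_eq_foldl, PySem.Dict.keys, Function.comp_def]
    rw [hkeyseq, List.nil_append]
    refine List.map_congr_left ?_
    intro k hk
    simp only [PySem.Dict.getD_foldl_modify_append]
    simp [List.filter_map, List.map_map, Function.comp_def, PySem.Dict.get?, PySem.Dict.getD]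
  · show _ = PySem.List.maxD _ _ _
    rw [hD, ← pv_foldmax_eq (adj_list.map pvDeg)
      (by intro x hx; simp only [List.mem_map] at hx; obtain ⟨p, -, hp⟩ := hx; subst hp
          exact Int.natCast_nonneg _)]
    rw [List.foldl_map]

-- ===== VERDICT (by name: the statement is the Claim_ definition above) =====
theorem generate_buckets_of_vertices_spec : Claim_equal_generate_buckets_of_vertices := by
  intro adj_list _ _
  exact generate_buckets_of_vertices_eq adj_list
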